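-- pv_equiv track=rewrite | github.com/xiaohuihui1024/functionIdentify | dealCode.py | get_include_lines
-- ===== SOURCE A (Python) =====
-- def get_include_lines(codes):
--     """
--     提取代码中include的行
--     :param codes: 传入将代码 readlines 的结果
--     :return: 代码中 # 开头的代码
--     """
--     results = list()
--     # 多行标志
--     flag = None
--     for line in codes:
--         clean_line = line.strip()
--         if clean_line.startswith("#") or flag:
--             results.append(line)
--             flag = False
--         if clean_line.endswith("\\"):
--             flag = True
--     return results
--     pass
-- ===== SOURCE B (Python) =====
-- def get_include_lines(codes):
--     codes = list(codes)
--     prevs = [None] + codes[:-1]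
--     return [line for prev, line in zip(prevs, codes)
--             if line.strip().startswith("#")
--             or (prev is not None and prev.strip().endswith("\\"))]
-- ===== Notes on version B (the rewrite author's own statement) =====
-- stated objective: simpler
-- what changed: Replaced the mutable one-line-memory flag and its two side-effecting ifs with a stateless comprehension over (predecessor, line) pairs: a line is kept iff it starts with '#' or its predecessor ends with a backslash.
import Mathlib
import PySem

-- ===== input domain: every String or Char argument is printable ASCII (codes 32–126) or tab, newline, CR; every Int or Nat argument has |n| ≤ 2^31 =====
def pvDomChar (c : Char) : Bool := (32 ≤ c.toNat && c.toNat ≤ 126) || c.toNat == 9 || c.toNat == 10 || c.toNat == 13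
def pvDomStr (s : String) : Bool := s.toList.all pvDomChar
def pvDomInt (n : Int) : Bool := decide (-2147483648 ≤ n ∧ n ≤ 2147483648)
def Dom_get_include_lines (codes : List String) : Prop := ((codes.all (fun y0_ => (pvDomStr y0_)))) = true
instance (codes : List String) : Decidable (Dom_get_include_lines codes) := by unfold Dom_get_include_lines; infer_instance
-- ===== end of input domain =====

-- B replaces A's mutable continuation flag with a stateless predecessor predicate (objective: simpler).

-- ===== PORT A =====
-- A's for-loop with the mutable `flag` (None/False/True) and accumulating `results`,
-- as the obvious structural recursion over the same state.
def getIncludeLoop (codes : List String) (flag : Option Bool) : List String :=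
  match codes with
  | [] => []
  | line :: rest =>
    let clean_line := PySem.Str.strip line
    let inc := PySem.Str.startswith clean_line "#" || (flag == some true)
    let flag1 := if inc then some false else flag
    let flag2 := if PySem.Str.endswith clean_line "\\" then some true else flag1
    (if inc then [line] else []) ++ getIncludeLoop rest flag2

def get_include_lines (codes : List String) : List String :=
  getIncludeLoop codes none

-- ===== PORT B =====
-- prevs = [None] + codes[:-1]; keep line iff it starts with '#' or prev ends with '\'.
def get_include_lines_alt (codes : List String) : List String :=
  let prevs : List (Option String) := none :: codes.dropLast.map some
  (prevs.zip codes).filterMap (fun pl =>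
    if (PySem.Str.startswith (PySem.Str.strip pl.2) "#" ||
        (match pl.1 with
         | some p => PySem.Str.endswith (PySem.Str.strip p) "\\"
         | none => false)) then some pl.2 else none)

-- ===== PRECONDITION & SPEC =====
def Spec_get_include_lines (codes : List String) (out : List String) : Prop := out = get_include_lines_alt codes
instance (codes : List String) (out : List String) : Decidable (Spec_get_include_lines codes out) := by unfold Spec_get_include_lines; infer_instance

-- ===== CLAIM (what is proved, stated in full; the proofs are below) =====
def Claim_equal_get_include_lines : Prop := ∀ (codes : List String), Dom_get_include_lines codes → Spec_get_include_lines codes (get_include_lines codes)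

-- ===== LEMMAS AND PROOFS =====

-- the zipped (predecessor, line) list unfolds one step at a time
theorem zip_prevs_cons (prev : Option String) (line : String) (rest : List String) :
    ((prev :: (line :: rest).dropLast.map some).zip (line :: rest)) =
      (prev, line) :: ((some line :: rest.dropLast.map some).zip rest) := by
  cases rest with
  | nil => rfl
  | cons b t => simp [List.dropLast]

-- invariant: A's flag is truthy iff the (optional) predecessor line ends with a backslash
theorem loop_eq_filter (codes : List String) :
    ∀ (flag : Option Bool) (prev : Option String),
    (flag == some true) = (match prev with
                           | some p => PySem.Str.endswith (PySem.Str.strip p) "\\"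
                           | none => false) →
    getIncludeLoop codes flag =
      ((prev :: codes.dropLast.map some).zip codes).filterMap (fun pl =>
        if (PySem.Str.startswith (PySem.Str.strip pl.2) "#" ||
            (match pl.1 with
             | some p => PySem.Str.endswith (PySem.Str.strip p) "\\"
             | none => false)) then some pl.2 else none) := by
  induction codes with
  | nil => intro flag prev _; rfl
  | cons line rest ih =>
    intro flag prev h
    rw [zip_prevs_cons, List.filterMap_cons]
    rw [getIncludeLoop]
    have hrec := ih (if PySem.Str.endswith (PySem.Str.strip line) "\\" then some true
                     else if PySem.Str.startswith (PySem.Str.strip line) "#" || (flag == some true)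
                          then some false else flag)
                    (some line)
                    (by split_ifs with h1 h2 <;> simp_all)
    -- align the flag threaded by the port with the one in hrec
    simp only [← h]
    split_ifs with hinc <;>
      simp_all

-- ===== VERDICT (by name: the statement is the Claim_ definition above) =====
theorem get_include_lines_spec : Claim_equal_get_include_lines := by
  intro codes _
  unfold Spec_get_include_lines get_include_lines get_include_lines_alt
  exact loop_eq_filter codes none none rfl
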